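-- pv_equiv track=rewrite | github.com/mdsultanmahmud/BioInformatics_Task | Task_2_Coding_bat/string_two.py | xyz_there
-- ===== SOURCE A (Python) =====
-- def xyz_there(str):
--     status = False
--     for i in range(len(str) -1):
--         if(str[i:i+3] == 'xyz'):
--             if(str[i-1] != '.'):
--                 status = True
--             else: status = False
--     return status
-- ===== SOURCE B (Python) =====
-- def xyz_there(str):
--     idx = str.rfind('xyz')
--     if idx == -1:
--         return False
--     return str[idx - 1] != '.'
-- ===== Notes on version B (the rewrite author's own statement) =====
-- stated objective: faster
-- what changed: Replaced the forward loop that re-slices at every index and keeps a last-match-wins status flag with a single str.rfind('xyz') for the last occurrence and one neighbour-character test (str[idx-1], preserving the negative-index wrap at idx 0).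
import Mathlib
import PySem

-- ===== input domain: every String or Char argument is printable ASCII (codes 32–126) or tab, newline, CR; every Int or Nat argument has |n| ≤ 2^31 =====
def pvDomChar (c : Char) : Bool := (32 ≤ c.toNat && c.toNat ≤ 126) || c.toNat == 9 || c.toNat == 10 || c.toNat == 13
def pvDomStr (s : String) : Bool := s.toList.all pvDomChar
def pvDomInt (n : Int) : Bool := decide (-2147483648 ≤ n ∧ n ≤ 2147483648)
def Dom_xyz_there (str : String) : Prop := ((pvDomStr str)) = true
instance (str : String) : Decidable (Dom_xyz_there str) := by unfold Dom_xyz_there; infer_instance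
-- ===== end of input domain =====

-- B replaces A's forward scan with a single rfind of the last 'xyz' plus one neighbour test
-- (str[idx-1], keeping Python's negative-index wrap at idx 0); objective: faster (constant factor).

-- ===== PORT A =====
def xyz_there (str : String) : Bool :=
  (PySem.List.pyRange 0 ((PySem.Str.len str : Int) - 1) 1).foldl
    (fun status i =>
      if PySem.Str.slice str (some i) (some (i + 3)) = "xyz" then
        if PySem.Str.pyGet? str (i - 1) ≠ some '.' then true else false
      else status)
    false

-- ===== PORT B =====
def xyz_there_alt (str : String) : Bool :=
  let idx := PySem.Str.rfind str "xyz"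
  if idx = -1 then false
  else if PySem.Str.pyGet? str (idx - 1) ≠ some '.' then true else false

-- ===== PRECONDITION & SPEC =====
def Spec_xyz_there (str : String) (out : Bool) : Prop := out = xyz_there_alt str
instance (str : String) (out : Bool) : Decidable (Spec_xyz_there str out) := by unfold Spec_xyz_there; infer_instance

-- ===== CLAIM (what is proved, stated in full; the proofs are below) =====
def Claim_equal_xyz_there : Prop := ∀ (str : String), Dom_xyz_there str → Spec_xyz_there str (xyz_there str)

-- ===== LEMMAS AND PROOFS =====

-- A last-match-wins fold: the result is g of the last element passing P, else the initial value.
theorem pv_foldl_lastmatch {α β : Type} (P : α → Prop) [DecidablePred P] (g : α → β)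
    (l : List α) (b : β) :
    l.foldl (fun s i => if P i then g i else s) b
      = ((l.filter (fun i => decide (P i))).getLast?).elim b g := by
  induction l generalizing b with
  | nil => rfl
  | cons x t ih =>
    by_cases hx : P x
    · simp only [List.foldl_cons, if_pos hx, List.filter_cons, decide_eq_true hx, ih]
      cases h : (t.filter (fun i => decide (P i))).getLast? <;>
        simp [List.getLast?_cons, h]
    · simp only [List.foldl_cons, if_neg hx, List.filter_cons]
      rw [decide_eq_false hx]
      simp [ih]

-- rfind.go scans indices k, k-1, …, 0 and returns the highest match: characterised as the
-- last index in range (k+1) whose suffix starts with sub.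
theorem pv_rfind_go_eq (s sub : List Char) (k : Nat) :
    PySem.Chars.rfind.go s sub k
      = (((List.range (k + 1)).filter (fun j => sub.isPrefixOf (s.drop j))).getLast?).elim
          (-1) (fun j => (j : Int)) := by
  induction k with
  | zero =>
    simp only [PySem.Chars.rfind.go]
    cases h : sub.isPrefixOf s <;> simp [h]
  | succ k ih =>
    rw [PySem.Chars.rfind.go]
    have hr : List.range (k + 1 + 1) = List.range (k + 1) ++ [k + 1] := by
      rw [List.range_add]; simp
    rw [hr, List.filter_append]
    cases h : sub.isPrefixOf (s.drop (k + 1)) with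
    | true => simp [h]
    | false => simpa [h] using ih

theorem pv_filter_range_high {P : Nat → Bool} {m1 m2 : Nat} (h12 : m1 ≤ m2)
    (h : ∀ j, m1 ≤ j → P j = false) :
    (List.range m2).filter P = (List.range m1).filter P := by
  have : List.range m2 = List.range m1 ++ (List.range (m2 - m1)).map (fun x => m1 + x) := by
    rw [← List.range_add]; congr 1; omega
  rw [this, List.filter_append, List.filter_map]
  have : (List.range (m2 - m1)).filter ((fun j => P j) ∘ fun x => m1 + x) = [] := by
    apply List.filter_eq_nil_iff.mpr
    intro a _; simp only [Function.comp]; exact Bool.eq_false_iff.mp (h (m1 + a) (by omega))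
  simp [this]

-- the slice test at a natural index is exactly the prefix test on the dropped list
theorem pv_slice_eq_prefix (cs : List Char) (k : Nat) :
    (PySem.List.slice cs (some (k : Int)) (some ((k : Int) + 3)) = ['x', 'y', 'z'])
      ↔ (['x', 'y', 'z'].isPrefixOf (cs.drop k) = true) := by
  have h3 : ((k : Int) + 3) = ((k : Int) + ((3 : Nat) : Int)) := by norm_num
  rw [h3, PySem.List.slice_natCast_add, List.isPrefixOf_iff_prefix, List.prefix_iff_eq_take]
  constructor
  · intro h; exact h.symm
  · intro h; exact h.symm

theorem pv_match_false_of_high (cs : List Char) (j : Nat) (hj : cs.length - 1 ≤ j + 1) :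
    (['x', 'y', 'z'].isPrefixOf (cs.drop j) = false) := by
  rw [Bool.eq_false_iff]
  intro hpre
  have := List.IsPrefix.length_le (List.isPrefixOf_iff_prefix.mp hpre)
  simp [List.length_drop] at this
  omega

-- ===== VERDICT (by name: the statement is the Claim_ definition above) =====
theorem xyz_there_spec : Claim_equal_xyz_there := by
  intro str _
  unfold Spec_xyz_there xyz_there xyz_there_alt
  set cs := str.toList with hcs
  set n := cs.length with hn
  -- rewrite A's range to naturals
  have hlen : (PySem.Str.len str : Int) - 1 = ((n - 1 : Nat) : Int) ∨ n = 0 := by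
    by_cases h0 : n = 0
    · right; exact h0
    · left; simp [PySem.Str.len, ← hcs, ← hn]; omega
  have hQ : ∀ j : Nat, n - 1 ≤ j → (['x','y','z'].isPrefixOf (cs.drop j)) = false := by
    intro j hj
    exact pv_match_false_of_high cs j (by omega)
  -- characterise B
  have hB : PySem.Str.rfind str "xyz"
      = (((List.range (n - 1)).filter (fun j => ['x','y','z'].isPrefixOf (cs.drop j))).getLast?).elim
          (-1) (fun j => (j : Int)) := by
    show PySem.Chars.rfind cs "xyz".toList = _
    unfold PySem.Chars.rfind
    rw [pv_rfind_go_eq]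
    simp only [show "xyz".toList = ['x','y','z'] from rfl]
    exact congrArg (fun o : Option Nat => o.elim (-1 : Int) (fun j => (j : Int)))
      (congrArg List.getLast? (pv_filter_range_high (show n - 1 ≤ n + 1 by omega) hQ))
  -- characterise A
  have hA : (PySem.List.pyRange 0 ((PySem.Str.len str : Int) - 1) 1).foldl
      (fun status i =>
        if PySem.Str.slice str (some i) (some (i + 3)) = "xyz" then
          if PySem.Str.pyGet? str (i - 1) ≠ some '.' then true else false
        else status) false
      = (((List.range (n - 1)).filter (fun j => ['x','y','z'].isPrefixOf (cs.drop j))).getLast?).elim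
          false (fun j => if PySem.Str.pyGet? str ((j : Int) - 1) ≠ some '.' then true else false) := by
    rcases hlen with hlen | hlen
    · rw [hlen, PySem.List.pyRange_zero_natCast,
        pv_foldl_lastmatch (fun i => PySem.Str.slice str (some i) (some (i + 3)) = "xyz")
          (fun i => if PySem.Str.pyGet? str (i - 1) ≠ some '.' then true else false)]
      rw [List.filter_map, List.getLast?_map]
      have hfil : List.filter
            ((fun i => decide (PySem.Str.slice str (some i) (some (i + 3)) = "xyz")) ∘ (fun k : Nat => (k : Int)))
            (List.range (n - 1))
          = List.filter (fun j => ['x','y','z'].isPrefixOf (cs.drop j)) (List.range (n - 1)) := by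
        apply List.filter_congr
        intro j _
        simp only [Function.comp]
        have hiff : (PySem.Str.slice str (some (j : Int)) (some ((j : Int) + 3)) = "xyz")
            ↔ (['x','y','z'].isPrefixOf (cs.drop j) = true) := by
          rw [← pv_slice_eq_prefix cs j]
          constructor
          · intro h
            have := congrArg String.toList h
            simpa [PySem.Str.toList_slice, ← hcs] using this
          · intro h
            have : (PySem.Str.slice str (some (j : Int)) (some ((j : Int) + 3))).toList = "xyz".toList := by
              simpa [PySem.Str.toList_slice, ← hcs] using h
            exact String.toList_injective this
        rw [decide_eq_decide.mpr hiff, Bool.decide_coe]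
      rw [hfil]
      cases ((List.range (n - 1)).filter (fun j => ['x','y','z'].isPrefixOf (cs.drop j))).getLast? <;>
        simp
    · -- empty string: range(-1) is empty, and the filtered range is empty too
      have h1 : PySem.Str.len str = 0 := by
        simp [PySem.Str.len, ← hcs, ← hn, hlen]
      rw [h1]
      have : PySem.List.pyRange 0 ((0 : Int) - 1) 1 = ([] : List Int) := by decide
      rw [this]
      simp [hlen]
  rw [hA, hB]
  cases h : ((List.range (n - 1)).filter (fun j => ['x','y','z'].isPrefixOf (cs.drop j))).getLast? with
  | none => simp
  | some j =>
    simp only [Option.elim]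
    rw [if_neg (show ¬ ((j : Int) = -1) by omega)]
    rfl
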